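-- pv_equiv track=rewrite | github.com/gxiaolab/L-GIREMI | giremi/cs.py | cigar_md_to_read_coordinate
-- ===== SOURCE A (Python) =====
-- def cigar_md_to_read_coordinate(cigar_md, reference_start = 0):
--     read_coord = list()
--     read_pos = 0
--     for ref_low, ref_high, cigar_mark, cigar_value in cigar_md:
--         ref_len = ref_high - ref_low
--         if cigar_mark in ['M', 'X']:
--             read_coord.append(
--                 [read_pos, read_pos + ref_len, cigar_mark, cigar_value]
--             )
--             read_pos += ref_len
--         elif cigar_mark == 'I':
--             seq_len = int(cigar_value)
--             read_coord.append(
--                 [read_pos, read_pos + seq_len, cigar_mark, cigar_value]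
--             )
--             read_pos += seq_len
--         elif cigar_mark in ['D', 'N']:
--             read_coord.append(
--                 [read_pos, read_pos, cigar_mark, cigar_value]
--             )
--     return read_coord
-- ===== SOURCE B (Python) =====
-- def cigar_md_to_read_coordinate(cigar_md, reference_start=0):
--     segs = list(cigar_md)
--
--     def solve(i, j):
--         # returns (records for segs[i:j] with read coordinates relative to 0,
--         #          total read length consumed by segs[i:j])
--         if j - i == 0:
--             return [], 0
--         if j - i == 1:
--             ref_low, ref_high, mark, value = segs[i]
--             if mark in ('M', 'X'):
--                 ln = ref_high - ref_low
--                 return [[0, ln, mark, value]], ln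
--             if mark == 'I':
--                 ln = int(value)
--                 return [[0, ln, mark, value]], ln
--             if mark in ('D', 'N'):
--                 return [[0, 0, mark, value]], 0
--             return [], 0
--         mid = (i + j) // 2
--         left, llen = solve(i, mid)
--         right, rlen = solve(mid, j)
--         return (left + [[a + llen, b + llen, mk, v] for a, b, mk, v in right],
--                 llen + rlen)
--
--     return solve(0, len(segs))[0]
-- ===== Notes on version B (the rewrite author's own statement) =====
-- stated objective: alternative
-- what changed: Replaces A's single left-to-right loop with a running read_pos accumulator by a divide-and-conquer: each half of the list is converted independently with coordinates relative to 0, and the right half's records are translated by the left half's total read length; correct because read coordinates are a prefix sum, which is associative under translation.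
import Mathlib
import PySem

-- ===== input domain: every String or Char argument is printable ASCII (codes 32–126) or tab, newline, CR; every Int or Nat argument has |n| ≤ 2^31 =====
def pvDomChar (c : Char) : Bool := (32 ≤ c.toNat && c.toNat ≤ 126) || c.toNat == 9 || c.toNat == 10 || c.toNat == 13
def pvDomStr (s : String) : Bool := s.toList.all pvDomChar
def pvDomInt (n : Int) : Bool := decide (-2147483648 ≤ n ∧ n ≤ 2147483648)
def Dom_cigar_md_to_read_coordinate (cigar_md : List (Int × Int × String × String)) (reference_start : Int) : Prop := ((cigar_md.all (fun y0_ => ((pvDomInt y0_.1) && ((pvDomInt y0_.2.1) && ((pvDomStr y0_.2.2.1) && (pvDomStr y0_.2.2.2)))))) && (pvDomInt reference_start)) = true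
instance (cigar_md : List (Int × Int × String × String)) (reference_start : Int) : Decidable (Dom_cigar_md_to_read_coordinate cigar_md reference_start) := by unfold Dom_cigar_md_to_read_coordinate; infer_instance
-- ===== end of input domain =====

-- B replaces A's stateful read_pos accumulator loop with a divide-and-conquer: each half is
-- converted relative to read position 0 and the right half is translated by the left half's
-- total read length (alternative decomposition; A is O(n), B is O(n log n)).


-- ===== PORT A =====
-- A's for-loop over cigar_md carrying read_pos, as the obvious structural recursion over the list.
-- int(cigar_value) is ported as (PySem.Int.ofStr? _).getD 0; Pre_ excludes the inputs where Python raises ValueError.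
def pvA_go : List (Int × Int × String × String) → Int → List (Int × Int × String × String)
  | [], _ => []
  | (ref_low, ref_high, cigar_mark, cigar_value) :: rest, read_pos =>
    let ref_len := ref_high - ref_low
    if cigar_mark = "M" ∨ cigar_mark = "X" then
      (read_pos, read_pos + ref_len, cigar_mark, cigar_value) :: pvA_go rest (read_pos + ref_len)
    else if cigar_mark = "I" then
      let seq_len := (PySem.Int.ofStr? cigar_value).getD 0
      (read_pos, read_pos + seq_len, cigar_mark, cigar_value) :: pvA_go rest (read_pos + seq_len)
    else if cigar_mark = "D" ∨ cigar_mark = "N" then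
      (read_pos, read_pos, cigar_mark, cigar_value) :: pvA_go rest read_pos
    else
      pvA_go rest read_pos

def cigar_md_to_read_coordinate (cigar_md : List (Int × Int × String × String)) (reference_start : Int) : List (Int × Int × String × String) :=
  pvA_go cigar_md 0

-- ===== PORT B =====
-- Source B's solve(i, j): divide and conquer on the segment list; returns the records of that
-- sublist with read coordinates relative to 0, paired with its total read length.
def pvB_solve : List (Int × Int × String × String) → (List (Int × Int × String × String)) × Int
  | [] => ([], 0)
  | [(ref_low, ref_high, mark, value)] =>
    if mark = "M" ∨ mark = "X" then
      let ln := ref_high - ref_low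
      ([(0, ln, mark, value)], ln)
    else if mark = "I" then
      let ln := (PySem.Int.ofStr? value).getD 0
      ([(0, ln, mark, value)], ln)
    else if mark = "D" ∨ mark = "N" then
      ([(0, 0, mark, value)], 0)
    else ([], 0)
  | e1 :: e2 :: rest =>
    let l := e1 :: e2 :: rest
    let mid := l.length / 2
    let L := pvB_solve (l.take mid)
    let R := pvB_solve (l.drop mid)
    (L.1 ++ R.1.map (fun t => (t.1 + L.2, t.2.1 + L.2, t.2.2)), L.2 + R.2)
termination_by l => l.length
decreasing_by
  · simp; omega
  · simp; omega

def cigar_md_to_read_coordinate_alt (cigar_md : List (Int × Int × String × String)) (reference_start : Int) : List (Int × Int × String × String) :=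
  (pvB_solve cigar_md).1

-- ===== PRECONDITION & SPEC =====
-- Pre_ excludes exactly the inputs on which Python A raises ValueError: a segment with mark 'I'
-- whose value string is not int()-parseable. (B raises there too.)
def Pre_cigar_md_to_read_coordinate (cigar_md : List (Int × Int × String × String)) (reference_start : Int) : Prop :=
  ∀ seg ∈ cigar_md, seg.2.2.1 = "I" → (PySem.Int.ofStr? seg.2.2.2).isSome
instance (cigar_md : List (Int × Int × String × String)) (reference_start : Int) : Decidable (Pre_cigar_md_to_read_coordinate cigar_md reference_start) := by unfold Pre_cigar_md_to_read_coordinate; infer_instance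

def pvWitness_cigar_md_to_read_coordinate : (List (Int × Int × String × String)) × Int :=
  ([(0, 3, "M", "3"), (3, 3, "I", "2"), (3, 5, "D", "2"), (5, 9, "X", "4")], 0)

def Spec_cigar_md_to_read_coordinate (cigar_md : List (Int × Int × String × String)) (reference_start : Int) (out : List (Int × Int × String × String)) : Prop := out = cigar_md_to_read_coordinate_alt cigar_md reference_start
instance (cigar_md : List (Int × Int × String × String)) (reference_start : Int) (out : List (Int × Int × String × String)) : Decidable (Spec_cigar_md_to_read_coordinate cigar_md reference_start out) := by unfold Spec_cigar_md_to_read_coordinate; infer_instance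

-- ===== CLAIM (what is proved, stated in full; the proofs are below) =====
def Claim_equal_cigar_md_to_read_coordinate : Prop := ∀ (cigar_md : List (Int × Int × String × String)) (reference_start : Int), Dom_cigar_md_to_read_coordinate cigar_md reference_start → Pre_cigar_md_to_read_coordinate cigar_md reference_start → Spec_cigar_md_to_read_coordinate cigar_md reference_start (cigar_md_to_read_coordinate cigar_md reference_start)

-- ===== LEMMAS AND PROOFS =====

-- read-length contribution of one segment, and of a list (proof-side only)
def pvContrib (seg : Int × Int × String × String) : Int :=
  if seg.2.2.1 = "M" ∨ seg.2.2.1 = "X" then seg.2.1 - seg.1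
  else if seg.2.2.1 = "I" then (PySem.Int.ofStr? seg.2.2.2).getD 0
  else 0

def pvCsum (l : List (Int × Int × String × String)) : Int := (l.map pvContrib).sum

theorem pvCsum_append (a b : List (Int × Int × String × String)) :
    pvCsum (a ++ b) = pvCsum a + pvCsum b := by
  simp [pvCsum]

-- A's loop started at p + q is A's loop started at q, translated by p.
theorem pvA_go_shift (l : List (Int × Int × String × String)) (p q : Int) :
    pvA_go l (p + q) = (pvA_go l q).map (fun t => (t.1 + p, t.2.1 + p, t.2.2)) := by
  induction l generalizing q with
  | nil => rfl
  | cons e rest ih =>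
    obtain ⟨lo, hi, mk, v⟩ := e
    by_cases hM : mk = "M" ∨ mk = "X"
    · simp only [pvA_go, if_pos hM, List.map_cons]
      rw [show p + q + (hi - lo) = p + (q + (hi - lo)) from by ring, ih (q + (hi - lo))]
      simp only [List.cons.injEq, Prod.mk.injEq]
      exact ⟨⟨by ring, by ring, trivial⟩, trivial⟩
    · by_cases hI : mk = "I"
      · simp only [pvA_go, if_neg hM, if_pos hI, List.map_cons]
        rw [show p + q + (PySem.Int.ofStr? v).getD 0 = p + (q + (PySem.Int.ofStr? v).getD 0) from by ring,
            ih (q + (PySem.Int.ofStr? v).getD 0)]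
        simp only [List.cons.injEq, Prod.mk.injEq]
        exact ⟨⟨by ring, by ring, trivial⟩, trivial⟩
      · by_cases hD : mk = "D" ∨ mk = "N"
        · simp only [pvA_go, if_neg hM, if_neg hI, if_pos hD, List.map_cons]
          rw [ih q]
          simp only [List.cons.injEq, Prod.mk.injEq]
          exact ⟨⟨by ring, by ring, trivial⟩, trivial⟩
        · simp only [pvA_go, if_neg hM, if_neg hI, if_neg hD]
          rw [ih q]

-- A's loop over a concatenation splits, the right part starting at the left part's total length.
theorem pvA_go_append (a b : List (Int × Int × String × String)) (p : Int) :
    pvA_go (a ++ b) p = pvA_go a p ++ pvA_go b (p + pvCsum a) := by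
  induction a generalizing p with
  | nil => simp [pvA_go, pvCsum]
  | cons e rest ih =>
    obtain ⟨lo, hi, mk, v⟩ := e
    have hc : pvCsum ((lo, hi, mk, v) :: rest) = pvContrib (lo, hi, mk, v) + pvCsum rest := by
      simp [pvCsum]
    by_cases hM : mk = "M" ∨ mk = "X"
    · simp only [List.cons_append, pvA_go, if_pos hM, ih, hc, pvContrib]
      simp [hM]
      ring_nf
    · by_cases hI : mk = "I"
      · simp only [List.cons_append, pvA_go, if_neg hM, if_pos hI, ih, hc, pvContrib]
        simp [hM, hI]
        ring_nf
      · by_cases hD : mk = "D" ∨ mk = "N"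
        · simp only [List.cons_append, pvA_go, if_neg hM, if_neg hI, if_pos hD, ih, hc, pvContrib]
          simp [hM, hI]
        · simp only [List.cons_append, pvA_go, if_neg hM, if_neg hI, if_neg hD, ih, hc, pvContrib]
          simp [hM, hI]

-- B's divide-and-conquer computes A's records (relative to 0) together with the total length.
theorem pvB_solve_spec (l : List (Int × Int × String × String)) :
    pvB_solve l = (pvA_go l 0, pvCsum l) := by
  induction l using pvB_solve.induct with
  | case1 => simp [pvB_solve, pvA_go, pvCsum]
  | case2 lo hi mk v hM =>
    simp [pvB_solve, pvA_go, pvCsum, pvContrib, hM]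
  | case3 lo hi v hM =>
    simp [pvB_solve, pvA_go, pvCsum, pvContrib, hM]
  | case4 lo hi mk v hM hI hD =>
    simp [pvB_solve, pvA_go, pvCsum, pvContrib, hM, hI, hD]
  | case5 lo hi mk v hM hI hD =>
    simp [pvB_solve, pvA_go, pvCsum, pvContrib, hM, hI, hD]
  | case6 e1 e2 rest lv midv ihL ihR =>
    simp only [lv, midv] at ihL ihR
    rw [pvB_solve]
    simp only [ihL, ihR]
    have hsplit : (e1 :: e2 :: rest) = (e1 :: e2 :: rest).take ((e1 :: e2 :: rest).length / 2)
        ++ (e1 :: e2 :: rest).drop ((e1 :: e2 :: rest).length / 2) := by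
      exact (List.take_append_drop _ _).symm
    refine Prod.ext ?_ ?_
    · show _ = pvA_go (e1 :: e2 :: rest) 0
      conv_rhs => rw [hsplit]
      rw [pvA_go_append]
      rw [show (0 : Int) + pvCsum ((e1 :: e2 :: rest).take ((e1 :: e2 :: rest).length / 2))
            = pvCsum ((e1 :: e2 :: rest).take ((e1 :: e2 :: rest).length / 2)) + 0 from by ring]
      rw [pvA_go_shift]
    · show _ = pvCsum (e1 :: e2 :: rest)
      conv_rhs => rw [hsplit]
      rw [pvCsum_append]

-- ===== VERDICT (by name: the statement is the Claim_ definition above) =====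
theorem cigar_md_to_read_coordinate_spec : Claim_equal_cigar_md_to_read_coordinate := by
  intro cigar_md reference_start _ _
  unfold Spec_cigar_md_to_read_coordinate cigar_md_to_read_coordinate cigar_md_to_read_coordinate_alt
  rw [pvB_solve_spec]
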